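-- pv_equiv track=rewrite | github.com/gabrieltren/urionline | 1848.py | valor
-- ===== SOURCE A (Python) =====
-- def valor(p,v,i):
--     if i == 0:
--         if p == '*':
--             return 2**v[i]
--         else:
--             return 0
--     else:
--         if p[i] == '*':
--             return 2**v[i] + valor(p[:i],v,(i-1))
--         else:
--             return valor(p[:i],v,(i-1))
-- ===== SOURCE B (Python) =====
-- def valor(p, v, i):
--     # Iterative scan replacing A's slicing recursion.
--     if i == 0:
--         return 2 ** v[0] if p == '*' else 0
--     total = 2 ** v[0] if p[0] == '*' else 0
--     for k in range(1, i + 1):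
--         if p[k] == '*':
--             total += 2 ** v[k]
--     return total
-- ===== Notes on version B (the rewrite author's own statement) =====
-- stated objective: faster
-- what changed: Replaced the recursion that slices a fresh copy of the string at every step (O(i^2) copying, recursion-limit bound) with a single iterative loop accumulating the sum over the indices 1..i (measured ~20x at n=16384).
import Mathlib
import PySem

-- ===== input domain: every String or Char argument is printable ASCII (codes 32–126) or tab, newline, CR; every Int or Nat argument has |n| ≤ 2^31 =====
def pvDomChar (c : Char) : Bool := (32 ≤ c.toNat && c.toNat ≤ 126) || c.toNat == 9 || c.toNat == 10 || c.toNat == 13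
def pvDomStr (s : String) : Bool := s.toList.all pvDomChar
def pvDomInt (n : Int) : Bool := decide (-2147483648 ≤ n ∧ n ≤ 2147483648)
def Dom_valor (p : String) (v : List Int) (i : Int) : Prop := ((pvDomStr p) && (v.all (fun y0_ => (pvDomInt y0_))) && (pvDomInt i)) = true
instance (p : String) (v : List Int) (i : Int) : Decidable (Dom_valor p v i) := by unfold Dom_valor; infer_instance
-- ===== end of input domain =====

-- B replaces A's string-slicing recursion by one iterative scan over the indices (faster: no per-step string copies or recursion; measured ~20x at n=16384 in a timing run); return values agree on Pre_.

-- ===== PORT A =====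
-- literal port of A; the 'i < 0' branch only makes the recursion total (Python never returns there: it
-- shrinks the string and eventually raises IndexError; excluded by Pre_)
def valor (p : String) (v : List Int) (i : Int) : Int :=
  if i = 0 then
    if p = "*" then (2 : Int) ^ ((PySem.List.pyGet? v i).getD 0).toNat else 0
  else if i < 0 then 0
  else
    if PySem.Str.pyGet? p i = some '*' then
      (2 : Int) ^ ((PySem.List.pyGet? v i).getD 0).toNat + valor (PySem.Str.slice p none (some i)) v (i - 1)
    else
      valor (PySem.Str.slice p none (some i)) v (i - 1)
termination_by i.toNat
decreasing_by all_goals omega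

-- ===== PORT B =====
def valor_alt (p : String) (v : List Int) (i : Int) : Int :=
  if i = 0 then
    if p = "*" then (2 : Int) ^ ((PySem.List.pyGet? v 0).getD 0).toNat else 0
  else
    (PySem.List.pyRange 1 (i + 1) 1).foldl
      (fun total k =>
        if PySem.Str.pyGet? p k = some '*' then
          total + (2 : Int) ^ ((PySem.List.pyGet? v k).getD 0).toNat
        else total)
      (if PySem.Str.pyGet? p 0 = some '*' then (2 : Int) ^ ((PySem.List.pyGet? v 0).getD 0).toNat else 0)

-- ===== PRECONDITION & SPEC =====
-- Pre_ = exactly the inputs on which Python A returns an int: i ≥ 0 (negative i shrinks p until IndexError),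
-- p[i] in range when i > 0, and every exponent A actually evaluates (index k with a '*' guard; for the direct
-- i = 0 call the guard is the whole string p == "*") has v[k] defined and nonnegative (else float or IndexError).
def Pre_valor (p : String) (v : List Int) (i : Int) : Prop :=
  0 ≤ i ∧ (i = 0 ∨ i < (p.toList.length : Int)) ∧
  (∀ k ∈ List.range (i.toNat + 1), 1 ≤ k → p.toList.getD k ' ' = '*' → (k < v.length ∧ 0 ≤ v.getD k 0)) ∧
  ((if i = 0 then p = "*" else p.toList.getD 0 ' ' = '*') → (0 < v.length ∧ 0 ≤ v.getD 0 0))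
instance (p : String) (v : List Int) (i : Int) : Decidable (Pre_valor p v i) := by unfold Pre_valor; infer_instance

def pvWitness_valor : String × List Int × Int := ("*a*", [3, 1, 2], 2)

def Spec_valor (p : String) (v : List Int) (i : Int) (out : Int) : Prop := out = valor_alt p v i
instance (p : String) (v : List Int) (i : Int) (out : Int) : Decidable (Spec_valor p v i out) := by unfold Spec_valor; infer_instance

-- ===== CLAIM (what is proved, stated in full; the proofs are below) =====
def Claim_equal_valor : Prop := ∀ (p : String) (v : List Int) (i : Int), Dom_valor p v i → Pre_valor p v i → Spec_valor p v i (valor p v i)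

-- ===== LEMMAS AND PROOFS =====

-- the exponent term 2**v[k] (with an out-of-range default that Pre_ rules out)
def pvPw (v : List Int) (k : Int) : Int := (2 : Int) ^ ((PySem.List.pyGet? v k).getD 0).toNat

-- the guarded summand at index k
def pvTerm (p : String) (v : List Int) (k : Int) : Int :=
  if PySem.Str.pyGet? p k = some '*' then pvPw v k else 0

theorem pvFoldl_body (p : String) (v : List Int) (l : List Int) (init : Int) :
    l.foldl (fun total k =>
        if PySem.Str.pyGet? p k = some '*' then total + (2 : Int) ^ ((PySem.List.pyGet? v k).getD 0).toNat
        else total) init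
      = init + (l.map (pvTerm p v)).sum := by
  induction l generalizing init with
  | nil => simp
  | cons a l ih =>
      simp only [List.foldl_cons, List.map_cons, List.sum_cons, ih, pvTerm, pvPw]
      split_ifs <;> ring

theorem pvSlice_get (p : String) (i k : Int) (h0 : 0 ≤ k) (hk : k < i) :
    PySem.Str.pyGet? (PySem.Str.slice p none (some i)) k = PySem.Str.pyGet? p k := by
  have h1 : (PySem.Str.slice p none (some i)).toList = p.toList.take i.toNat := by
    simp [PySem.Str.slice, PySem.List.slice_to (xs := p.toList) (by omega : (0:Int) ≤ i)]
  simp [PySem.Str.pyGet?, h1, PySem.List.pyGet?_of_nonneg (xs := p.toList) h0,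
        PySem.List.pyGet?_of_nonneg (xs := p.toList.take i.toNat) h0]
  exact List.getElem?_take_of_lt (by omega)

theorem pvSlice_eq_star (p : String) :
    (PySem.Str.slice p none (some 1) = "*") ↔ PySem.Str.pyGet? p 0 = some '*' := by
  have h1 : (PySem.Str.slice p none (some 1)).toList = p.toList.take 1 := by
    simp [PySem.Str.slice, PySem.List.slice_to (xs := p.toList) (by omega : (0:Int) ≤ 1)]
  rw [show (PySem.Str.slice p none (some 1) = "*") ↔ ((PySem.Str.slice p none (some 1)).toList = ['*']) from
        ⟨fun h => by rw [h]; rfl, fun h => String.toList_inj.mp h⟩, h1]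
  simp [PySem.Str.pyGet?, PySem.List.pyGet?_of_nonneg (xs := p.toList) (by omega : (0:Int) ≤ 0)]
  cases p.toList <;> simp

theorem pvValor_step (p : String) (v : List Int) (i : Int) (h : 0 < i) :
    valor p v i = pvTerm p v i + valor (PySem.Str.slice p none (some i)) v (i - 1) := by
  rw [valor, if_neg (by omega), if_neg (by omega)]
  unfold pvTerm pvPw
  split_ifs <;> ring

theorem pvValor_zero (p : String) (v : List Int) :
    valor p v 0 = if p = "*" then pvPw v 0 else 0 := by
  rw [valor]; simp [pvPw]

theorem pvValor_sum (n : Nat) (p : String) (v : List Int) :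
    valor p v ((n : Int) + 1)
      = (if PySem.Str.pyGet? p 0 = some '*' then pvPw v 0 else 0)
        + ((PySem.List.pyRange 1 ((n : Int) + 2) 1).map (pvTerm p v)).sum := by
  induction n generalizing p with
  | zero =>
      rw [show ((0:Nat):Int) + 1 = 1 by norm_num, pvValor_step p v 1 one_pos,
          show (1:Int) - 1 = 0 by norm_num, pvValor_zero]
      simp only [pvSlice_eq_star]
      rw [show ((0:Nat):Int) + 2 = 1 + 1 by norm_num, PySem.List.pyRange_one_singleton]
      simp only [List.map_cons, List.map_nil, List.sum_cons, List.sum_nil]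
      have : pvTerm p v 0 = if PySem.Str.pyGet? p 0 = some '*' then pvPw v 0 else 0 := rfl
      rw [← this]
      unfold pvTerm
      split_ifs <;> ring
  | succ m ih =>
      have hcast : ((m + 1 : Nat) : Int) + 1 = ((m : Nat) : Int) + 2 := by push_cast; ring
      rw [hcast, pvValor_step p v ((m : Int) + 2) (by omega),
          show ((m : Nat) : Int) + 2 - 1 = ((m : Nat) : Int) + 1 by ring,
          ih (PySem.Str.slice p none (some ((m : Int) + 2)))]
      rw [pvSlice_get p ((m : Int) + 2) 0 (by omega) (by omega)]
      have hmap : (PySem.List.pyRange 1 ((m : Int) + 2) 1).map (pvTerm (PySem.Str.slice p none (some ((m : Int) + 2))) v)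
          = (PySem.List.pyRange 1 ((m : Int) + 2) 1).map (pvTerm p v) := by
        apply List.map_congr_left
        intro k hk
        rw [PySem.List.mem_pyRange_one] at hk
        unfold pvTerm
        rw [pvSlice_get p ((m : Int) + 2) k (by omega) (by omega)]
      rw [hmap]
      rw [show ((m + 1 : Nat) : Int) + 2 = (((m : Nat) : Int) + 2) + 1 by push_cast; ring,
          PySem.List.pyRange_one_succ_right (by omega : (1:Int) ≤ (m : Int) + 2),
          List.map_append, List.sum_append]
      simp only [List.map_cons, List.map_nil, List.sum_cons, List.sum_nil]
      ring

theorem valor_spec' (p : String) (v : List Int) (i : Int) (hi : 0 ≤ i) :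
    valor p v i = valor_alt p v i := by
  rcases eq_or_lt_of_le hi with h0 | hpos
  · subst h0
    rw [pvValor_zero]
    simp [valor_alt, pvPw]
  · have hn : i = ((i - 1).toNat : Int) + 1 := by omega
    rw [hn, pvValor_sum]
    unfold valor_alt
    rw [if_neg (show ¬(((i - 1).toNat : Int) + 1 = 0) from by omega)]
    rw [pvFoldl_body]
    rw [show ((i - 1).toNat : Int) + 1 + 1 = ((i - 1).toNat : Int) + 2 from by ring]
    simp [pvPw]

-- ===== VERDICT (by name: the statement is the Claim_ definition above) =====
theorem valor_spec : Claim_equal_valor := by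
  intro p v i _ hpre
  unfold Spec_valor
  exact valor_spec' p v i hpre.1
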